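-- pv_equiv track=rewrite | github.com/daniel-reich/ubiquitous-fiesta | snZDZ8nxwGCJCka5M_19.py | pyramidal_string
-- ===== SOURCE A (Python) =====
-- def pyramidal_string(string, _type):
--     if _type == 'REG':
--         st = string
--     elif _type == 'REV':
--         st = string[::-1]
--     ln = 1
--     lout = []
--     while len(st) >= ln:
--         s2 = ' '.join(list(st[:ln]))
--         st = st[ln:]
--         if _type == 'REG':
--             lout.insert(len(lout), s2)
--         elif _type == 'REV':
--             lout.insert(0, s2[::-1])
--         ln += 1
--         if 0 < len(st) < ln:
--             return "Error!"
--     return lout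
-- ===== SOURCE B (Python) =====
-- def pyramidal_string(string, _type):
--     if _type == 'REV':
--         src = string[::-1]
--     elif _type == 'REG':
--         src = string
--     else:
--         raise ValueError('unknown type: ' + _type)
--     n = len(src)
--     k = total = 0
--     while total < n:
--         k += 1
--         total += k
--     if total != n:
--         return "Error!"
--     rows = [' '.join(src[i * (i + 1) // 2:(i + 1) * (i + 2) // 2]) for i in range(k)]
--     if _type == 'REV':
--         rows = [r[::-1] for r in rows][::-1]
--     return rows
-- ===== Notes on version B (the rewrite author's own statement) =====
-- stated objective: alternative
-- what changed: A repeatedly slices a shrinking remainder inside a while-loop (prepending for REV); B first finds the row count k by a triangular-number scan, validates the length once, then builds each row by indexing directly into the fixed source with closed-form offsets, handling REV as a post-transform (reverse each row, reverse the row order).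
-- outside the precondition, e.g. on pyramidal_string('ab', 'REG'): A returns 'Error!', B returns 'Error!'; on pyramidal_string('a', 'XYZ'): A raises UnboundLocalError, B raises ValueError
import Mathlib
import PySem

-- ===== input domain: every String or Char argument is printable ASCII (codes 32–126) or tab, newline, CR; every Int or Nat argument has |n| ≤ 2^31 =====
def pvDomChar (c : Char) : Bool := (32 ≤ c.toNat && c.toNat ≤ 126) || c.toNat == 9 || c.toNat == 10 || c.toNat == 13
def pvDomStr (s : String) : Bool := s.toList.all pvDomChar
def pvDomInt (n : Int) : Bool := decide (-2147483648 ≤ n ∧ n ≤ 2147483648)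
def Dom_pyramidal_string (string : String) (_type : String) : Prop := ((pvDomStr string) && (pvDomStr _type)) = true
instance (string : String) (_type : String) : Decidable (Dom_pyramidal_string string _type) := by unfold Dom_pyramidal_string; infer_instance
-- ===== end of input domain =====

-- B rewrites A's shrinking-remainder while-loop as: find the row count k by a triangular-number
-- scan, validate once, then build rows by direct indexed chunking (REV = post-transform).


-- ===== PORT A =====
-- ' '.join(list(cs)) : exact for a list of single characters (Chars.join with each char a singleton)
def pvJoinSp (cs : List Char) : List Char := PySem.Chars.join [' '] (cs.map (fun c => [c]))

-- A's while-loop; fuel only makes the same computation total (each iteration consumes ln ≥ 1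
-- characters, so st.length + 1 fuel is never exhausted).  st[:ln]/st[ln:] are take/drop (natural bounds).
def pvALoop : Nat → List Char → Nat → List String → String → List String
  | 0, _, _, lout, _ => lout
  | f+1, st, ln, lout, t =>
    if ln ≤ st.length then
      let s2 := pvJoinSp (st.take ln)
      let st' := st.drop ln
      let lout' := if t == "REG" then lout ++ [String.ofList s2]
                   else if t == "REV" then String.ofList s2.reverse :: lout
                   else lout
      if 0 < st'.length ∧ st'.length < ln + 1 then ["Error!"]
      else pvALoop f st' (ln + 1) lout' t
    else lout

def pyramidal_string (string : String) (_type : String) : List String :=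
  -- for _type ∉ {REG, REV} Python raises UnboundLocalError (st unbound): outside Pre_
  let st := if _type == "REG" then string.toList
            else if _type == "REV" then string.toList.reverse
            else string.toList
  pvALoop (st.length + 1) st 1 [] _type

-- ===== PORT B =====
-- Source B's `while total < n: k += 1; total += k`; fuel n suffices (total grows by ≥ 1 each step)
def pvTriFind (n : Nat) : Nat → Nat → Nat → Nat × Nat
  | 0, k, total => (k, total)
  | f+1, k, total => if total < n then pvTriFind n f (k + 1) (total + (k + 1)) else (k, total)

def pyramidal_string_alt (string : String) (_type : String) : List String :=
  -- Source B raises ValueError for _type ∉ {REG, REV}: outside Pre_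
  let src := if _type == "REV" then string.toList.reverse else string.toList
  let n := src.length
  let p := pvTriFind n n 0 0
  if p.2 ≠ n then ["Error!"]  -- Source B returns the str "Error!" here (not a list): outside Pre_
  else
    let rows := (List.range p.1).map (fun i =>
      String.ofList (pvJoinSp ((src.drop (i * (i + 1) / 2)).take ((i + 1) * (i + 2) / 2 - i * (i + 1) / 2))))
    if _type == "REV" then (rows.map (fun r => String.ofList r.toList.reverse)).reverse else rows

-- ===== PRECONDITION & SPEC =====
-- Pre_ excludes (a) _type outside {'REG','REV'}, where A raises UnboundLocalError, and
-- (b) non-triangular string lengths, where A returns the str "Error!" — not a value of the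
-- declared list type (B does the same in Python; the List String ports are unclaimed there).
def Pre_pyramidal_string (string : String) (_type : String) : Prop :=
  (_type = "REG" ∨ _type = "REV") ∧
  ∃ k ≤ string.toList.length, k * (k + 1) / 2 = string.toList.length
instance (string : String) (_type : String) : Decidable (Pre_pyramidal_string string _type) := by
  unfold Pre_pyramidal_string; infer_instance

def pvWitness_pyramidal_string : String × String := ("abc", "REV")

def Spec_pyramidal_string (string : String) (_type : String) (out : List String) : Prop := out = pyramidal_string_alt string _type
instance (string : String) (_type : String) (out : List String) : Decidable (Spec_pyramidal_string string _type out) := by unfold Spec_pyramidal_string; infer_instance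

-- ===== CLAIM (what is proved, stated in full; the proofs are below) =====
def Claim_equal_pyramidal_string : Prop := ∀ (string : String) (_type : String), Dom_pyramidal_string string _type → Pre_pyramidal_string string _type → Spec_pyramidal_string string _type (pyramidal_string string _type)

-- ===== LEMMAS AND PROOFS =====

-- seg m k = (m+1) + (m+2) + … + (m+k); tri k = seg 0 k
def pvSeg (m : Nat) : Nat → Nat
  | 0 => 0
  | k+1 => (m + 1) + pvSeg (m + 1) k

def pvTri (k : Nat) : Nat := pvSeg 0 k

theorem pvSeg_succ_right (m k : Nat) : pvSeg m (k + 1) = pvSeg m k + (m + k + 1) := by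
  induction k generalizing m with
  | zero => simp [pvSeg]
  | succ k ih =>
      have e1 : pvSeg m (k + 1 + 1) = (m + 1) + pvSeg (m + 1) (k + 1) := rfl
      have e2 : pvSeg m (k + 1) = (m + 1) + pvSeg (m + 1) k := rfl
      rw [e1, ih (m + 1), e2]
      omega

theorem pvTri_succ (k : Nat) : pvTri (k + 1) = pvTri k + (k + 1) := by
  simpa [pvTri] using pvSeg_succ_right 0 k

theorem pvTri_div (k : Nat) : k * (k + 1) / 2 = pvTri k := by
  induction k with
  | zero => simp [pvTri, pvSeg]
  | succ k ih =>
      have h : (k + 1) * (k + 2) = k * (k + 1) + 2 * (k + 1) := by ring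
      rw [pvTri_succ, ← ih]
      show (k + 1) * (k + 1 + 1) / 2 = _
      rw [h, Nat.add_mul_div_left _ _ (by norm_num : 0 < 2)]

theorem pvTri_lt (j k : Nat) (h : j < k) : pvTri j < pvTri k := by
  induction k with
  | zero => omega
  | succ k ih =>
      rw [pvTri_succ]
      rcases Nat.lt_succ_iff_lt_or_eq.mp h with h' | h'
      · exact lt_of_lt_of_le (ih h') (by omega)
      · subst h'; omega

theorem pvTri_ge_self (k : Nat) : k ≤ pvTri k := by
  induction k with
  | zero => simp
  | succ k ih => rw [pvTri_succ]; omega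

theorem pvTriFind_eq (n : Nat) : ∀ (f k j : Nat), k ≤ j → pvTri j = n → j - k ≤ f →
    pvTriFind n f k (pvTri k) = (j, n) := by
  intro f
  induction f with
  | zero =>
      intro k j hkj htri hf
      have : k = j := by omega
      subst this
      simp [pvTriFind, htri]
  | succ f ih =>
      intro k j hkj htri hf
      by_cases hlt : pvTri k < n
      · have hkj' : k < j := by
          by_contra hc
          have : j = k := by omega
          subst this; omega
        have hstep : pvTri k + (k + 1) = pvTri (k + 1) := (pvTri_succ k).symm
        show (if pvTri k < n then pvTriFind n f (k + 1) (pvTri k + (k + 1)) else (k, pvTri k)) = (j, n)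
        rw [if_pos hlt, hstep]
        exact ih (k + 1) j hkj' htri (by omega)
      · have hk : k = j := by
          by_contra hc
          have : k < j := by omega
          have := pvTri_lt k j this
          omega
        subst hk
        show (if pvTri k < n then pvTriFind n f (k + 1) (pvTri k + (k + 1)) else (k, pvTri k)) = (k, n)
        rw [if_neg hlt, htri]

theorem pvSeg_zero_or_ge (m k : Nat) : pvSeg m k = 0 ∨ m + 1 ≤ pvSeg m k := by
  cases k with
  | zero => left; rfl
  | succ k => right; simp [pvSeg]

-- A's loop on the REG branch produces the chunked rows directly
theorem pvALoop_reg : ∀ (k f m : Nat) (rest : List Char) (lout : List String),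
    rest.length = pvSeg m k → k ≤ f →
    pvALoop f rest (m + 1) lout "REG" =
      lout ++ (List.range k).map
        (fun i => String.ofList (pvJoinSp ((rest.drop (pvSeg m i)).take (m + 1 + i)))) := by
  intro k
  induction k with
  | zero =>
      intro f m rest lout hlen _
      have : rest = [] := by
        cases rest with
        | nil => rfl
        | cons a l => simp [pvSeg] at hlen
      subst this
      cases f <;> simp [pvALoop]
  | succ k ih =>
      intro f m rest lout hlen hf
      cases f with
      | zero => omega
      | succ f =>
        have hlen' : rest.length = (m + 1) + pvSeg (m + 1) k := by simpa [pvSeg] using hlen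
        have hcond : m + 1 ≤ rest.length := by omega
        have hdrop : (rest.drop (m + 1)).length = pvSeg (m + 1) k := by
          simp [List.length_drop, hlen']
        have herr : ¬ (0 < (rest.drop (m + 1)).length ∧ (rest.drop (m + 1)).length < m + 1 + 1) := by
          rw [hdrop]
          rcases pvSeg_zero_or_ge (m + 1) k with h | h <;> omega
        have hstep : pvALoop (f + 1) rest (m + 1) lout "REG"
            = pvALoop f (rest.drop (m + 1)) (m + 1 + 1)
                (lout ++ [String.ofList (pvJoinSp (rest.take (m + 1)))]) "REG" := by
          simp only [pvALoop, if_pos hcond, if_neg herr]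
          simp
        rw [hstep,
          ih f (m + 1) (rest.drop (m + 1)) (lout ++ [String.ofList (pvJoinSp (rest.take (m + 1)))]) hdrop (by omega),
          List.range_succ_eq_map, List.map_cons, List.map_map, List.append_assoc,
          List.singleton_append]
        refine congrArg (lout ++ ·) ?_
        congr 1
        all_goals try simp [pvSeg]
        all_goals intro i _
        all_goals have e : m + 1 + 1 + i = m + 1 + (i + 1) := by omega
        all_goals rw [e]

-- A's loop on the REV branch: reversed rows, prepended
theorem pvALoop_rev : ∀ (k f m : Nat) (rest : List Char) (lout : List String),
    rest.length = pvSeg m k → k ≤ f →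
    pvALoop f rest (m + 1) lout "REV" =
      ((List.range k).map
        (fun i => String.ofList (pvJoinSp ((rest.drop (pvSeg m i)).take (m + 1 + i))).reverse)).reverse
      ++ lout := by
  intro k
  induction k with
  | zero =>
      intro f m rest lout hlen _
      have : rest = [] := by
        cases rest with
        | nil => rfl
        | cons a l => simp [pvSeg] at hlen
      subst this
      cases f <;> simp [pvALoop]
  | succ k ih =>
      intro f m rest lout hlen hf
      cases f with
      | zero => omega
      | succ f =>
        have hlen' : rest.length = (m + 1) + pvSeg (m + 1) k := by simpa [pvSeg] using hlen
        have hcond : m + 1 ≤ rest.length := by omega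
        have hdrop : (rest.drop (m + 1)).length = pvSeg (m + 1) k := by
          simp [List.length_drop, hlen']
        have herr : ¬ (0 < (rest.drop (m + 1)).length ∧ (rest.drop (m + 1)).length < m + 1 + 1) := by
          rw [hdrop]
          rcases pvSeg_zero_or_ge (m + 1) k with h | h <;> omega
        have hstep : pvALoop (f + 1) rest (m + 1) lout "REV"
            = pvALoop f (rest.drop (m + 1)) (m + 1 + 1)
                (String.ofList (pvJoinSp (rest.take (m + 1))).reverse :: lout) "REV" := by
          simp only [pvALoop, if_pos hcond, if_neg herr]
          simp
        rw [hstep,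
          ih f (m + 1) (rest.drop (m + 1))
            (String.ofList (pvJoinSp (rest.take (m + 1))).reverse :: lout) hdrop (by omega),
          List.range_succ_eq_map, List.map_cons, List.map_map, List.reverse_cons,
          List.append_assoc, List.singleton_append]
        congr 1
        all_goals try simp [pvSeg]
        all_goals intro i _
        all_goals have e : m + 1 + 1 + i = m + 1 + (i + 1) := by omega
        all_goals rw [e]

-- B's chunk bounds coincide with seg-based ones
theorem pv_chunk_eq (src : List Char) (i : Nat) :
    (src.drop (i * (i + 1) / 2)).take ((i + 1) * (i + 2) / 2 - i * (i + 1) / 2)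
      = (src.drop (pvSeg 0 i)).take (0 + 1 + i) := by
  have h1 : i * (i + 1) / 2 = pvTri i := pvTri_div i
  have h2 : (i + 1) * (i + 2) / 2 = pvTri (i + 1) := by
    have := pvTri_div (i + 1); simpa using this
  have h3 : pvTri (i + 1) - pvTri i = i + 1 := by rw [pvTri_succ]; omega
  rw [h1, h2, h3, show 0 + 1 + i = i + 1 from by omega]
  rfl

-- ===== VERDICT (by name: the statement is the Claim_ definition above) =====
theorem pyramidal_string_spec : Claim_equal_pyramidal_string := by
  intro string _type _ hpre
  obtain ⟨htype, j, hj_le, hj_tri⟩ := hpre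
  unfold Spec_pyramidal_string
  have hjtri : pvTri j = string.toList.length := by rw [← pvTri_div]; exact hj_tri
  rcases htype with h | h <;> subst h
  · -- REG
    have hsrc : string.toList.length = pvSeg 0 j := hjtri.symm
    unfold pyramidal_string pyramidal_string_alt
    have hbeq : ("REG" == "REG") = true := by decide
    have hbeq2 : ("REG" == "REV") = false := by decide
    simp only [hbeq, hbeq2, if_pos, Bool.false_eq_true, if_false]
    have hfind : pvTriFind string.toList.length string.toList.length 0 0 = (j, string.toList.length) := by
      have h0 : pvTri 0 = 0 := rfl
      have := pvTriFind_eq string.toList.length string.toList.length 0 j (Nat.zero_le _) hjtri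
        (by have := pvTri_ge_self j; omega)
      rw [← h0]; exact this
    rw [hfind]
    simp only [ne_eq, not_true_eq_false, if_false]
    rw [pvALoop_reg j (string.toList.length + 1) 0 string.toList [] hsrc (by have := pvTri_ge_self j; omega)]
    rw [List.nil_append]
    apply List.map_congr_left
    intro i _
    rw [pv_chunk_eq]
  · -- REV
    have hlen : string.toList.reverse.length = pvSeg 0 j := by
      rw [List.length_reverse]; exact hjtri.symm
    unfold pyramidal_string pyramidal_string_alt
    have hbeq : ("REV" == "REG") = false := by decide
    have hbeq2 : ("REV" == "REV") = true := by decide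
    simp only [hbeq, hbeq2, Bool.false_eq_true, if_false, if_true]
    have hfind : pvTriFind string.toList.reverse.length string.toList.reverse.length 0 0
        = (j, string.toList.reverse.length) := by
      have hjtri' : pvTri j = string.toList.reverse.length := by
        rw [List.length_reverse]; exact hjtri
      have := pvTriFind_eq string.toList.reverse.length string.toList.reverse.length 0 j
        (Nat.zero_le _) hjtri' (by have := pvTri_ge_self j; omega)
      exact this
    rw [hfind]
    simp only [ne_eq, not_true_eq_false, if_false]
    rw [pvALoop_rev j (string.toList.reverse.length + 1) 0 string.toList.reverse []
      hlen (by have := pvTri_ge_self j; rw [List.length_reverse]; omega)]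
    rw [List.append_nil]
    apply congrArg
    rw [List.map_map]
    apply List.map_congr_left
    intro i _
    simp only [Function.comp]
    rw [pv_chunk_eq]
    simp
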